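-- pv_equiv track=rewrite | github.com/LIKELION-INHA-9-ALGORITHM-STUDY/likelion-inha-9-algorithm-study | week-09/손민혁/03/solution.py | solution
-- ===== SOURCE A (Python) =====
-- def solution(chars):
--     """
--     풀이: "-"가 등장하면 부호(flag)를 -로 바꾸고 정답에서 하염없이 뺀다.
--     """
--     ans = 0
--     s = ""
--     flag = 1
--     for char in chars:
--         if char.isdigit():
--             if s == "0":  # 처음부터 0이 나오면 대체 해주기
--                 s = char
--             else:
--                 s += char  # 다음 부호가 나올때까지 문자를 연결해서 숫자를 만든다.
--         else:
--             ans += flag * int(s)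
--             s = ""
--             if char == "-":
--                 flag = -1
--     ans += flag * int(s)
--     return ans
-- ===== SOURCE B (Python) =====
-- def solution(chars):
--     # Two-phase: tokenize into digit-run tokens and separator chars, then
--     # split the token sums at the first '-' separator (everything after it
--     # is subtracted, since A's flag never resets).
--     nums, seps, cur = [], [], ""
--     for c in chars:
--         if c.isdigit():
--             cur += c
--         else:
--             nums.append(cur)
--             seps.append(c)
--             cur = ""
--     nums.append(cur)
--     vals = [int(t) for t in nums]
--     k = seps.index("-") + 1 if "-" in seps else len(vals)
--     return sum(vals[:k]) - sum(vals[k:])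
-- ===== Notes on version B (the rewrite author's own statement) =====
-- stated objective: alternative
-- what changed: A's single pass that accumulates a digit string and a sticky sign flag is replaced by a two-phase decomposition: tokenize into digit-run tokens and separator chars, then compute sum(tokens up to and including the first '-' separator) minus sum(the rest).
-- outside the precondition, e.g. on solution('-'): A raises ValueError, B raises ValueError; on solution('1--2'): A raises ValueError, B raises ValueError; on solution(''): A raises ValueError, B raises ValueError
import Mathlib
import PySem

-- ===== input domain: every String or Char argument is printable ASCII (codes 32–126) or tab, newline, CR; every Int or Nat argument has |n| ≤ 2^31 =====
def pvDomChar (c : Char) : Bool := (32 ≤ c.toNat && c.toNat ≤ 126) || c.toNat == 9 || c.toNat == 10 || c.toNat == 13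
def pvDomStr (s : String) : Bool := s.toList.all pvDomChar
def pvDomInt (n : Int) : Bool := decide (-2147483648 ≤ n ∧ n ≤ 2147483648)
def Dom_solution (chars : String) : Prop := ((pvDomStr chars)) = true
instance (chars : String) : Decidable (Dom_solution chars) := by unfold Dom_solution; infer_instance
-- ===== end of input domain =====

-- B is an alternative decomposition of A (tokenize, then split the token sums at the
-- first '-' separator); same cost, no speed claim.

-- Hand port of Python's int(t), exact on the inputs it ever receives here: in both
-- programs int() is applied only to runs of ASCII digits '0'-'9'; on a nonempty such
-- run Python returns this fold's value, and on the empty run Python raises ValueError —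
-- exactly those inputs are excluded by Pre_solution below.
def pyIntRun (s : List Char) : Int :=
  s.foldl (fun a c => a * 10 + ((c.toNat : Int) - 48)) 0

-- ===== PORT A =====
-- state (ans, s, flag) as in A's loop; char.isdigit() on a one-char string = Chars.isdigit
def solution (chars : String) : Int :=
  let st := chars.toList.foldl
    (fun (st : Int × List Char × Int) c =>
      if PySem.Chars.isdigit c then
        if st.2.1 = ['0'] then (st.1, [c], st.2.2)
        else (st.1, st.2.1 ++ [c], st.2.2)
      else
        (st.1 + st.2.2 * pyIntRun st.2.1, [], if c = '-' then -1 else st.2.2))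
    (0, [], 1)
  st.1 + st.2.2 * pyIntRun st.2.1

-- ===== PORT B =====
-- state (nums, seps, cur) as in Source B's tokenizing loop, then the arithmetic pass
def solution_alt (chars : String) : Int :=
  let st := chars.toList.foldl
    (fun (st : List (List Char) × List Char × List Char) c =>
      if PySem.Chars.isdigit c then (st.1, st.2.1, st.2.2 ++ [c])
      else (st.1 ++ [st.2.2], st.2.1 ++ [c], []))
    ([], [], [])
  let vals := (st.1 ++ [st.2.2]).map pyIntRun
  let k := match PySem.List.index? st.2.1 '-' with
           | some i => i + 1
           | none => vals.length
  (vals.take k).sum - (vals.drop k).sum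

-- ===== PRECONDITION & SPEC =====
-- Pre_ excludes exactly the inputs where Python A raises ValueError (int('') on an
-- empty digit run): the string must be nonempty, start and end with a digit, and have
-- no two adjacent non-digit characters.
def Pre_solution (chars : String) : Prop :=
  chars.toList ≠ [] ∧
  chars.toList.head?.any PySem.Chars.isdigit = true ∧
  chars.toList.getLast?.any PySem.Chars.isdigit = true ∧
  (chars.toList.zip chars.toList.tail).all
    (fun p => PySem.Chars.isdigit p.1 || PySem.Chars.isdigit p.2) = true
instance (chars : String) : Decidable (Pre_solution chars) := by unfold Pre_solution; infer_instance
def pvWitness_solution : String := "12-34+56"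

def Spec_solution (chars : String) (out : Int) : Prop := out = solution_alt chars
instance (chars : String) (out : Int) : Decidable (Spec_solution chars out) := by unfold Spec_solution; infer_instance

-- ===== CLAIM (what is proved, stated in full; the proofs are below) =====
def Claim_equal_solution : Prop := ∀ (chars : String), Dom_solution chars → Pre_solution chars → Spec_solution chars (solution chars)

-- ===== LEMMAS AND PROOFS =====

-- proof-side names for the two loops (definitionally the ports' lambdas)
def stepA (st : Int × List Char × Int) (c : Char) : Int × List Char × Int :=
  if PySem.Chars.isdigit c then
    if st.2.1 = ['0'] then (st.1, [c], st.2.2)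
    else (st.1, st.2.1 ++ [c], st.2.2)
  else
    (st.1 + st.2.2 * pyIntRun st.2.1, [], if c = '-' then -1 else st.2.2)

def finA (st : Int × List Char × Int) : Int := st.1 + st.2.2 * pyIntRun st.2.1

def stepB (st : List (List Char) × List Char × List Char) (c : Char) :
    List (List Char) × List Char × List Char :=
  if PySem.Chars.isdigit c then (st.1, st.2.1, st.2.2 ++ [c])
  else (st.1 ++ [st.2.2], st.2.1 ++ [c], [])

def outB (st : List (List Char) × List Char × List Char) : Int :=
  let vals := (st.1 ++ [st.2.2]).map pyIntRun
  let k := match PySem.List.index? st.2.1 '-' with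
           | some i => i + 1
           | none => vals.length
  (vals.take k).sum - (vals.drop k).sum

theorem solution_eq_finA (chars : String) :
    solution chars = finA (chars.toList.foldl stepA (0, [], 1)) := rfl

theorem solution_alt_eq_outB (chars : String) :
    solution_alt chars = outB (chars.toList.foldl stepB ([], [], [])) := rfl

-- proof-side tokenizer: digit runs and separators of cur ++ l
def toks : List Char → List Char → List (List Char) × List Char
  | cur, [] => ([cur], [])
  | cur, c :: r =>
    if PySem.Chars.isdigit c then toks (cur ++ [c]) r
    else ((toks [] r).1.cons cur, (toks [] r).2.cons c)

-- reference signed sum: token i is negated iff a '-' separator precedes it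
def ref : Int → List Int → List Char → Int
  | _, [], _ => 0
  | f, n :: _, [] => f * n
  | f, n :: ns, c :: cs => f * n + ref (if c = '-' then -1 else f) ns cs

theorem pyIntRun_append (s : List Char) (c : Char) :
    pyIntRun (s ++ [c]) = 10 * pyIntRun s + ((c.toNat : Int) - 48) := by
  simp [pyIntRun, List.foldl_append, mul_comm]

theorem toks_len (cur l : List Char) : (toks cur l).1.length = (toks cur l).2.length + 1 := by
  induction l generalizing cur with
  | nil => simp [toks]
  | cons c r ih =>
    simp only [toks]
    split
    · exact ih _
    · simp [ih []]

-- A's loop with quirk string q equals the reference sum over the true tokens,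
-- as long as q has the same numeric value as the true current token cur.
theorem loopA_eq (l : List Char) : ∀ (q cur : List Char) (ans flag : Int),
    pyIntRun q = pyIntRun cur →
    finA (l.foldl stepA (ans, q, flag))
      = ans + ref flag ((toks cur l).1.map pyIntRun) (toks cur l).2 := by
  induction l with
  | nil =>
    intro q cur ans flag hq
    simp [toks, ref, finA, hq]
  | cons c r ih =>
    intro q cur ans flag hq
    simp only [toks, List.foldl_cons]
    by_cases hd : PySem.Chars.isdigit c
    · simp only [stepA, hd, if_true]
      by_cases h0 : q = ['0']
      · have hq0 : pyIntRun cur = 0 := by rw [← hq, h0]; simp [pyIntRun]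
        rw [if_pos h0, ih [c] (cur ++ [c]) ans flag (by rw [pyIntRun_append, hq0]; simp [pyIntRun])]
      · rw [if_neg h0, ih (q ++ [c]) (cur ++ [c]) ans flag (by rw [pyIntRun_append, pyIntRun_append, hq])]
    · simp only [stepA, hd, Bool.false_eq_true, if_false]
      rw [ih [] [] (ans + flag * pyIntRun q) (if c = '-' then -1 else flag) rfl]
      rcases h1 : (toks ([] : List Char) r) with ⟨ns, ss⟩
      have hlen := toks_len ([] : List Char) r
      rw [h1] at hlen
      rcases ns with _ | ⟨n, ns⟩
      · simp at hlen
      · simp [ref, hq, add_assoc]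

-- B's tokenizing loop accumulates exactly toks
theorem loopB_eq (l : List Char) : ∀ (nums : List (List Char)) (seps cur : List Char),
    (l.foldl stepB (nums, seps, cur)).1 ++ [(l.foldl stepB (nums, seps, cur)).2.2]
        = nums ++ (toks cur l).1 ∧
    (l.foldl stepB (nums, seps, cur)).2.1 = seps ++ (toks cur l).2 := by
  induction l with
  | nil => intro nums seps cur; simp [toks]
  | cons c r ih =>
    intro nums seps cur
    simp only [toks, List.foldl_cons, stepB]
    by_cases hd : PySem.Chars.isdigit c
    · simp only [hd, if_true]
      exact ih nums seps (cur ++ [c])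
    · simp only [hd, Bool.false_eq_true, if_false]
      obtain ⟨i1, i2⟩ := ih (nums ++ [cur]) (seps ++ [c]) []
      constructor
      · rw [i1]; simp
      · rw [i2]; simp

-- once the flag is -1 it stays -1: the reference sum is minus the total
theorem ref_neg (ss : List Char) : ∀ (ns : List Int), ns.length = ss.length + 1 →
    ref (-1) ns ss = -ns.sum := by
  induction ss with
  | nil =>
    intro ns h
    rcases ns with _ | ⟨n, ns⟩
    · simp at h
    · rcases ns with _ | ⟨m, ns⟩
      · simp [ref]
      · simp at h
  | cons c ss ih =>
    intro ns h
    rcases ns with _ | ⟨n, ns⟩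
    · simp at h
    · have : (if c = '-' then (-1 : Int) else -1) = -1 := by split <;> rfl
      simp only [ref, this, ih ns (by simpa using h), List.sum_cons]
      ring

-- the reference sum equals B's split-at-the-first-'-' arithmetic
theorem ref_split (ss : List Char) : ∀ (ns : List Int), ns.length = ss.length + 1 →
    ref 1 ns ss =
      (ns.take (match PySem.List.index? ss '-' with | some i => i + 1 | none => ns.length)).sum
    - (ns.drop (match PySem.List.index? ss '-' with | some i => i + 1 | none => ns.length)).sum := by
  induction ss with
  | nil =>
    intro ns h
    rcases ns with _ | ⟨n, ns⟩
    · simp at h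
    · rcases ns with _ | ⟨m, ns⟩
      · simp [ref, PySem.List.index?]
      · simp at h
  | cons c ss ih =>
    intro ns h
    rcases ns with _ | ⟨n, ns⟩
    · simp at h
    · have hlen : ns.length = ss.length + 1 := by simpa using h
      by_cases hc : c = '-'
      · subst hc
        rw [PySem.List.index?_cons_self]
        simp [ref, ref_neg ss ns hlen, sub_eq_add_neg]
      · rw [PySem.List.index?_cons_of_ne ss hc]
        simp only [ref, if_neg hc, one_mul, ih ns hlen]
        rcases hi : PySem.List.index? ss '-' with _ | i
        · simp only [Option.map_none, List.length_cons, List.take_succ_cons,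
            List.drop_succ_cons, List.sum_cons]
          ring
        · simp only [Option.map_some, List.take_succ_cons, List.drop_succ_cons, List.sum_cons]
          ring

-- ===== VERDICT (by name: the statement is the Claim_ definition above) =====
theorem solution_spec : Claim_equal_solution := by
  intro chars _ _
  unfold Spec_solution
  rw [solution_eq_finA, solution_alt_eq_outB, loopA_eq chars.toList [] [] 0 1 rfl]
  obtain ⟨h1, h2⟩ := loopB_eq chars.toList [] [] []
  simp only [List.nil_append] at h1 h2
  have hlen : ((toks [] chars.toList).1.map pyIntRun).length = (toks [] chars.toList).2.length + 1 := by
    simp [toks_len]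
  rw [outB, h1, h2, zero_add]
  have := ref_split (toks [] chars.toList).2 ((toks [] chars.toList).1.map pyIntRun) hlen
  simpa using this
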